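-- pv_equiv track=rewrite | github.com/SanyogitaPiya/LLM4TDD-Manual-Vs-Automated | ManualTDD/Use case Tests/Good Index Finder TDD.py | find_good_indices
-- ===== SOURCE A (Python) =====
-- def find_good_indices(nums, k):
--     n = len(nums)
--     result = []
--
--     # Early exit if k is too large to have valid indices
--     if n < 2 * k + 1:
--         return result
--
--     # Arrays to track the longest non-increasing and non-decreasing subarrays
--     left_non_increasing = [0] * n
--     right_non_decreasing = [0] * n
--
--     # Fill left_non_increasing: counts length of non-increasing subarray ending at each index
--     for i in range(1, n):
--         if nums[i] <= nums[i - 1]: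
--             left_non_increasing[i] = left_non_increasing[i - 1] + 1
--         else:
--             left_non_increasing[i] = 0
--
--     # Fill right_non_decreasing: counts length of non-decreasing subarray starting at each index
--     for i in range(n - 2, -1, -1):
--         if nums[i] <= nums[i + 1]:
--             right_non_decreasing[i] = right_non_decreasing[i + 1] + 1
--         else:
--             right_non_decreasing[i] = 0
--
--     # Check each potential "good index"
--     for i in range(k, n - k):
--         if left_non_increasing[i - 1] >= k - 1 and right_non_decreasing[i + 1] >= k - 1:
--             result.append(i)
--
--     return result
-- ===== SOURCE B (Python) =====
-- def find_good_indices(nums, k):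
--     n = len(nums)
--     if n < 2 * k + 1:
--         return []
--     return [i for i in range(k, n - k)
--             if all(nums[j + 1] <= nums[j] for j in range(i - k, i - 1))
--             and all(nums[j] <= nums[j + 1] for j in range(i + 1, i + k))]
-- ===== Notes on version B (the rewrite author's own statement) =====
-- stated objective: simpler
-- what changed: Replaces the two precomputed run-length DP arrays with a single comprehension that directly scans each candidate window for monotonicity.
import Mathlib
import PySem

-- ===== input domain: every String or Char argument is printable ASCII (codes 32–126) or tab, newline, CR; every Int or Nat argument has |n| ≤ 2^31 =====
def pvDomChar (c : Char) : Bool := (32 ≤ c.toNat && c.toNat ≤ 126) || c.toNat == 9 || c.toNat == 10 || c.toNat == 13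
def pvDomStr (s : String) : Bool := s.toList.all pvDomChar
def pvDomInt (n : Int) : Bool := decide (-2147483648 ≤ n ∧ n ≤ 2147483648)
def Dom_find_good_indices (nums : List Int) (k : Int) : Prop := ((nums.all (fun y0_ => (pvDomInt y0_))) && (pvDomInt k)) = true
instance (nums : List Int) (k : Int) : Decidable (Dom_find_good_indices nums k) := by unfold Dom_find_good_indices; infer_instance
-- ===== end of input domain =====

-- B replaces A's two precomputed run-length DP arrays by a direct scan of each candidate
-- window (simpler, shorter); equivalence is proved on Pre_ (k ≥ 1, or the early-exit case).

-- ===== PORT A =====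
def find_good_indices (nums : List Int) (k : Int) : List Int :=
  let n : Int := (nums.length : Int)
  let result : List Int := []
  if n < 2 * k + 1 then result
  else
    let left_non_increasing := (PySem.List.pyRange 1 n 1).foldl (fun left i =>
      if PySem.List.pyGetD nums i 0 ≤ PySem.List.pyGetD nums (i - 1) 0 then
        PySem.List.pySetD left i (PySem.List.pyGetD left (i - 1) 0 + 1)
      else
        PySem.List.pySetD left i 0) (List.replicate n.toNat 0)
    let right_non_decreasing := (PySem.List.pyRange (n - 2) (-1) (-1)).foldl (fun right i =>
      if PySem.List.pyGetD nums i 0 ≤ PySem.List.pyGetD nums (i + 1) 0 then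
        PySem.List.pySetD right i (PySem.List.pyGetD right (i + 1) 0 + 1)
      else
        PySem.List.pySetD right i 0) (List.replicate n.toNat 0)
    (PySem.List.pyRange k (n - k) 1).foldl (fun result i =>
      if k - 1 ≤ PySem.List.pyGetD left_non_increasing (i - 1) 0 ∧
         k - 1 ≤ PySem.List.pyGetD right_non_decreasing (i + 1) 0 then
        result ++ [i]
      else result) result

-- ===== PORT B =====
def find_good_indices_alt (nums : List Int) (k : Int) : List Int :=
  let n : Int := (nums.length : Int)
  if n < 2 * k + 1 then []
  else
    (PySem.List.pyRange k (n - k) 1).filter (fun i =>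
      (PySem.List.pyRange (i - k) (i - 1) 1).all (fun j =>
        PySem.List.pyGetD nums (j + 1) 0 ≤ PySem.List.pyGetD nums j 0) &&
      (PySem.List.pyRange (i + 1) (i + k) 1).all (fun j =>
        PySem.List.pyGetD nums j 0 ≤ PySem.List.pyGetD nums (j + 1) 0))

-- ===== PRECONDITION & SPEC =====
-- Pre_ excludes exactly the inputs where A raises IndexError: k ≤ 0 while the early-exit
-- guard n < 2k+1 does not fire (then A indexes its arrays out of range).
def Pre_find_good_indices (nums : List Int) (k : Int) : Prop :=
  1 ≤ k ∨ (nums.length : Int) < 2 * k + 1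
instance (nums : List Int) (k : Int) : Decidable (Pre_find_good_indices nums k) := by
  unfold Pre_find_good_indices; infer_instance
def pvWitness_find_good_indices : List Int × Int := ([3, 2, 1, 1, 2, 3], 2)

def Spec_find_good_indices (nums : List Int) (k : Int) (out : List Int) : Prop :=
  out = find_good_indices_alt nums k
instance (nums : List Int) (k : Int) (out : List Int) : Decidable (Spec_find_good_indices nums k out) := by
  unfold Spec_find_good_indices; infer_instance

-- ===== CLAIM (what is proved, stated in full; the proofs are below) =====
def Claim_equal_find_good_indices : Prop := ∀ (nums : List Int) (k : Int),
  Dom_find_good_indices nums k → Pre_find_good_indices nums k →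
  Spec_find_good_indices nums k (find_good_indices nums k)
-- ===== LEMMAS AND PROOFS =====

-- run length of the non-increasing run of adjacent pairs ending at index i (A's left array)
def runL (nums : List Int) : Nat → Int
  | 0 => 0
  | i + 1 =>
    if PySem.List.pyGetD nums ((i : Int) + 1) 0 ≤ PySem.List.pyGetD nums (i : Int) 0
    then runL nums i + 1 else 0

-- run length of the non-decreasing run of adjacent pairs starting at index i (A's right array)
def runR (nums : List Int) (i : Nat) : Int :=
  if _h : i + 1 < nums.length then
    (if PySem.List.pyGetD nums (i : Int) 0 ≤ PySem.List.pyGetD nums ((i : Int) + 1) 0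
     then runR nums (i + 1) + 1 else 0)
  else 0
termination_by nums.length - i

lemma runL_nonneg (nums : List Int) (i : Nat) : 0 ≤ runL nums i := by
  induction i with
  | zero => simp [runL]
  | succ i ih => unfold runL; split <;> omega

lemma runR_nonneg (nums : List Int) (i : Nat) : 0 ≤ runR nums i := by
  induction i using runR.induct nums with
  | case1 i h hle ih => unfold runR; simp only [h, dite_true, hle, if_true]; omega
  | case2 i h hle => unfold runR; simp only [h, dite_true, hle, if_false]; omega
  | case3 i h => unfold runR; simp only [h, dite_false]; omega

lemma runL_ge (nums : List Int) (m : Nat) : ∀ i : Nat, m ≤ i → i < nums.length →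
    ((m : Int) ≤ runL nums i ↔
      ∀ j : Nat, i - m ≤ j → j < i →
        PySem.List.pyGetD nums ((j : Int) + 1) 0 ≤ PySem.List.pyGetD nums (j : Int) 0) := by
  induction m with
  | zero =>
    intro i _ _
    constructor
    · intro _ j hj1 hj2; omega
    · intro _; exact_mod_cast runL_nonneg nums i
  | succ m ih =>
    intro i hmi hin
    obtain ⟨i', rfl⟩ : ∃ i', i = i' + 1 := ⟨i - 1, by omega⟩
    unfold runL
    by_cases hp : PySem.List.pyGetD nums ((i' : Int) + 1) 0 ≤ PySem.List.pyGetD nums (i' : Int) 0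
    · simp only [hp, if_true]
      have hstep : ((m : Int) + 1 ≤ runL nums i' + 1) ↔ ((m : Int) ≤ runL nums i') := by omega
      push_cast
      rw [hstep, ih i' (by omega) (by omega)]
      constructor
      · intro hall j hj1 hj2
        rcases Nat.lt_or_ge j i' with h | h
        · exact hall j (by omega) h
        · have hj : j = i' := by omega
          subst hj; exact hp
      · intro hall j hj1 hj2
        exact hall j (by omega) (by omega)
    · simp only [hp, if_false]
      constructor
      · intro h; exfalso; push_cast at h; omega
      · intro hall; exact absurd (hall i' (by omega) (by omega)) hp

lemma runR_ge (nums : List Int) (m : Nat) : ∀ i : Nat, i + m < nums.length →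
    ((m : Int) ≤ runR nums i ↔
      ∀ j : Nat, i ≤ j → j < i + m →
        PySem.List.pyGetD nums (j : Int) 0 ≤ PySem.List.pyGetD nums ((j : Int) + 1) 0) := by
  induction m with
  | zero =>
    intro i _
    constructor
    · intro _ j hj1 hj2; omega
    · intro _; exact_mod_cast runR_nonneg nums i
  | succ m ih =>
    intro i hin
    have h1 : i + 1 < nums.length := by omega
    rw [runR]
    simp only [h1, dite_true]
    by_cases hp : PySem.List.pyGetD nums (i : Int) 0 ≤ PySem.List.pyGetD nums ((i : Int) + 1) 0
    · simp only [hp, if_true]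
      have hstep : ((m : Int) + 1 ≤ runR nums (i + 1) + 1) ↔ ((m : Int) ≤ runR nums (i + 1)) := by omega
      push_cast
      rw [hstep, ih (i + 1) (by omega)]
      constructor
      · intro hall j hj1 hj2
        rcases Nat.lt_or_ge j (i + 1) with h | h
        · have hj : j = i := by omega
          subst hj; exact hp
        · exact hall j h (by omega)
      · intro hall j hj1 hj2
        have := hall j (by omega) (by omega)
        push_cast at this ⊢
        exact this
    · simp only [hp, if_false]
      constructor
      · intro h; exfalso; push_cast at h; omega
      · intro hall; exact absurd (hall i (by omega) (by omega)) hp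

-- the accumulated left fold computes runL at every index
lemma foldL_spec (nums : List Int) :
    ∀ (fuel : Nat) (t : Nat) (acc : List Int), 1 ≤ t → fuel = nums.length - t →
    acc.length = nums.length →
    (∀ j : Nat, j < nums.length → acc.getD j 0 = if j < t then runL nums j else 0) →
    ∀ j : Nat, j < nums.length →
      ((PySem.List.pyRange (t : Int) (nums.length : Int) 1).foldl (fun left i =>
        if PySem.List.pyGetD nums i 0 ≤ PySem.List.pyGetD nums (i - 1) 0 then
          PySem.List.pySetD left i (PySem.List.pyGetD left (i - 1) 0 + 1)
        else
          PySem.List.pySetD left i 0) acc).getD j 0 = runL nums j := by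
  intro fuel
  induction fuel with
  | zero =>
    intro t acc ht hfuel hlen hinv j hj
    rw [PySem.List.pyRange_one_eq_nil (by exact_mod_cast (by omega : nums.length ≤ t))]
    simp only [List.foldl_nil]
    rw [hinv j hj, if_pos (by omega)]
  | succ fuel ih =>
    intro t acc ht hfuel hlen hinv j hj
    obtain ⟨t', rfl⟩ : ∃ t', t = t' + 1 := ⟨t - 1, by omega⟩
    have htn : t' + 1 < nums.length := by omega
    rw [PySem.List.pyRange_one_cons (by exact_mod_cast htn)]
    simp only [List.foldl_cons]
    have hrange : ((t' + 1 : Nat) : Int) + 1 = ((t' + 2 : Nat) : Int) := by push_cast; ring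
    rw [hrange]
    refine ih (t' + 2) _ (by omega) (by omega) ?_ ?_ j hj
    · split <;> simp [hlen]
    · -- invariant for the updated accumulator
      intro j' hj'
      have hc : ((t' + 1 : Nat) : Int) - 1 = ((t' : Nat) : Int) := by push_cast; ring
      rw [← apply_ite (PySem.List.pySetD acc ((t' + 1 : Nat) : Int))]
      rw [PySem.List.pySetD_natCast]
      rw [List.getD_eq_getElem?_getD, List.getElem?_set]
      by_cases hjt : j' = t' + 1
      · subst hjt
        simp only [hlen.symm ▸ htn, if_pos]
        have hw : PySem.List.pyGetD acc (((t' + 1 : Nat) : Int) - 1) 0 = runL nums t' := by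
          rw [hc, PySem.List.pyGetD_natCast, hinv t' (by omega), if_pos (by omega)]
        rw [hw]
        have hrl : runL nums (t' + 1) =
            if PySem.List.pyGetD nums ((t' : Int) + 1) 0 ≤ PySem.List.pyGetD nums (t' : Int) 0
            then runL nums t' + 1 else 0 := rfl
        simp only [Option.getD_some, if_pos (by omega : t' + 1 < t' + 2), hrl, hc]
        have hcc : ((t' + 1 : Nat) : Int) = (t' : Int) + 1 := by push_cast; ring
        rw [hcc]
      · rw [if_neg (by omega)]
        rw [← List.getD_eq_getElem?_getD, hinv j' hj']
        by_cases hlt : j' < t' + 1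
        · rw [if_pos hlt, if_pos (by omega)]
        · rw [if_neg hlt, if_neg (by omega)]

lemma foldR_spec (nums : List Int) :
    ∀ (u : Nat) (acc : List Int), u + 1 ≤ nums.length →
    acc.length = nums.length →
    (∀ j : Nat, j < nums.length → acc.getD j 0 = if u ≤ j then runR nums j else 0) →
    ∀ j : Nat, j < nums.length →
      ((PySem.List.pyRange ((u : Int) - 1) (-1) (-1)).foldl (fun right i =>
        if PySem.List.pyGetD nums i 0 ≤ PySem.List.pyGetD nums (i + 1) 0 then
          PySem.List.pySetD right i (PySem.List.pyGetD right (i + 1) 0 + 1)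
        else
          PySem.List.pySetD right i 0) acc).getD j 0 = runR nums j := by
  intro u
  induction u with
  | zero =>
    intro acc hu hlen hinv j hj
    rw [show ((0 : Nat) : Int) - 1 = -1 by ring, PySem.List.pyRange_neg_one_eq_nil (by omega)]
    simp only [List.foldl_nil]
    rw [hinv j hj, if_pos (by omega)]
  | succ u ih =>
    intro acc hu hlen hinv j hj
    have hcons : ((u + 1 : Nat) : Int) - 1 = ((u : Nat) : Int) := by push_cast; ring
    rw [hcons, PySem.List.pyRange_neg_one_cons (by omega)]
    simp only [List.foldl_cons]
    refine ih _ (by omega) ?_ ?_ j hj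
    · split <;> simp [hlen]
    · intro j' hj'
      have hun : u + 1 ≤ nums.length := by omega
      rw [← apply_ite (PySem.List.pySetD acc ((u : Nat) : Int))]
      rw [PySem.List.pySetD_natCast]
      rw [List.getD_eq_getElem?_getD, List.getElem?_set]
      by_cases hjt : j' = u
      · subst hjt
        simp only [hlen.symm ▸ (by omega : j' < nums.length), if_pos]
        have hw : PySem.List.pyGetD acc ((j' : Int) + 1) 0 = runR nums (j' + 1) := by
          have hcc : ((j' : Nat) : Int) + 1 = ((j' + 1 : Nat) : Int) := by push_cast; ring
          rw [hcc, PySem.List.pyGetD_natCast]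
          by_cases hin : j' + 1 < nums.length
          · rw [hinv (j' + 1) hin, if_pos (by omega)]
          · rw [List.getD_eq_default _ _ (by omega), runR, dif_neg (by omega)]
        rw [hw]
        have hrr : runR nums j' =
            if PySem.List.pyGetD nums (j' : Int) 0 ≤ PySem.List.pyGetD nums ((j' : Int) + 1) 0
            then runR nums (j' + 1) + 1 else 0 := by
          rw [runR, dif_pos (by omega : j' + 1 < nums.length)]
        simp only [Option.getD_some, if_pos (by omega : j' ≤ j'), hrr]
      · rw [if_neg (by omega)]
        rw [← List.getD_eq_getElem?_getD, hinv j' hj']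
        by_cases hle : u + 1 ≤ j'
        · rw [if_pos hle, if_pos (by omega)]
        · rw [if_neg hle, if_neg (by omega)]

lemma foldl_if_append {P : Int → Prop} [DecidablePred P] :
    ∀ (l acc : List Int),
      l.foldl (fun acc i => if P i then acc ++ [i] else acc) acc =
        acc ++ l.filter (fun i => decide (P i)) := by
  intro l
  induction l with
  | nil => simp
  | cons x xs ih =>
    intro acc
    simp only [List.foldl_cons, List.filter_cons]
    by_cases h : P x <;> simp [h, ih]

-- ===== VERDICT (by name: the statement is the Claim_ definition above) =====
-- the two window conditions agree: A's array test at i equals B's direct scan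
lemma cond_left (nums : List Int) (k i : Int) (hk : 1 ≤ k) (hki : k ≤ i)
    (hin : i < (nums.length : Int) - k) :
    ((k - 1 ≤ runL nums (i - 1).toNat) ↔
      ((PySem.List.pyRange (i - k) (i - 1) 1).all (fun j =>
        decide (PySem.List.pyGetD nums (j + 1) 0 ≤ PySem.List.pyGetD nums j 0))) = true) := by
  have hm : (((k - 1).toNat : Nat) : Int) = k - 1 := by omega
  rw [← hm]
  rw [runL_ge nums (k - 1).toNat (i - 1).toNat (by omega) (by omega)]
  simp only [List.all_eq_true, PySem.List.mem_pyRange_one, decide_eq_true_eq]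
  constructor
  · intro h j hj
    have := h j.toNat (by omega) (by omega)
    rw [show ((j.toNat : Nat) : Int) = j by omega] at this
    exact this
  · intro h j hj1 hj2
    exact h (j : Int) (by omega)

lemma cond_right (nums : List Int) (k i : Int) (hk : 1 ≤ k) (hki : k ≤ i)
    (hin : i < (nums.length : Int) - k) :
    ((k - 1 ≤ runR nums (i + 1).toNat) ↔
      ((PySem.List.pyRange (i + 1) (i + k) 1).all (fun j =>
        decide (PySem.List.pyGetD nums j 0 ≤ PySem.List.pyGetD nums (j + 1) 0))) = true) := by
  have hm : (((k - 1).toNat : Nat) : Int) = k - 1 := by omega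
  rw [← hm]
  rw [runR_ge nums (k - 1).toNat (i + 1).toNat (by omega)]
  simp only [List.all_eq_true, PySem.List.mem_pyRange_one, decide_eq_true_eq]
  constructor
  · intro h j hj
    have := h j.toNat (by omega) (by omega)
    rw [show ((j.toNat : Nat) : Int) = j by omega] at this
    exact this
  · intro h j hj1 hj2
    exact h (j : Int) (by omega)

-- ===== VERDICT (by name: the statement is the Claim_ definition above) =====
theorem find_good_indices_spec : Claim_equal_find_good_indices := by
  intro nums k _ hpre
  unfold Spec_find_good_indices find_good_indices find_good_indices_alt
  by_cases hsm : ((nums.length : Int) < 2 * k + 1)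
  · simp only [if_pos hsm]
  · have hk : 1 ≤ k := by
      rcases hpre with h | h
      · exact h
      · exact absurd h hsm
    have hn : 2 * k + 1 ≤ (nums.length : Int) := by omega
    simp only [if_neg hsm]
    have hL := foldL_spec nums (nums.length - 1) 1
      (List.replicate ((nums.length : Int)).toNat 0) le_rfl (by omega)
      (by simp) (by
        intro j hj
        simp only [Int.toNat_natCast, List.getD_eq_getElem?_getD, List.getElem?_replicate,
          if_pos hj, Option.getD_some]
        rcases Nat.eq_zero_or_pos j with h0 | h0
        · subst h0; simp [runL]
        · rw [if_neg (by omega)])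
    rw [Nat.cast_one] at hL
    have hR := foldR_spec nums (nums.length - 1)
      (List.replicate ((nums.length : Int)).toNat 0) (by omega)
      (by simp) (by
        intro j hj
        simp only [Int.toNat_natCast, List.getD_eq_getElem?_getD, List.getElem?_replicate,
          if_pos hj, Option.getD_some]
        by_cases hle : nums.length - 1 ≤ j
        · rw [if_pos hle, runR, dif_neg (by omega)]
        · rw [if_neg hle])
    rw [show ((nums.length - 1 : Nat) : Int) - 1 = (nums.length : Int) - 2 by omega] at hR
    rw [foldl_if_append]
    rw [List.nil_append]
    apply List.filter_congr
    intro i hmem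
    rw [PySem.List.mem_pyRange_one] at hmem
    have hLi : PySem.List.pyGetD (List.foldl (fun left i =>
          if PySem.List.pyGetD nums i 0 ≤ PySem.List.pyGetD nums (i - 1) 0 then
            PySem.List.pySetD left i (PySem.List.pyGetD left (i - 1) 0 + 1)
          else PySem.List.pySetD left i 0)
          (List.replicate ((nums.length : Int)).toNat 0)
          (PySem.List.pyRange 1 (nums.length : Int) 1)) (i - 1) 0
        = runL nums (i - 1).toNat := by
      rw [show i - 1 = (((i - 1).toNat : Nat) : Int) by omega, PySem.List.pyGetD_natCast]
      exact hL _ (by omega)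
    have hRi : PySem.List.pyGetD (List.foldl (fun right i =>
          if PySem.List.pyGetD nums i 0 ≤ PySem.List.pyGetD nums (i + 1) 0 then
            PySem.List.pySetD right i (PySem.List.pyGetD right (i + 1) 0 + 1)
          else PySem.List.pySetD right i 0)
          (List.replicate ((nums.length : Int)).toNat 0)
          (PySem.List.pyRange ((nums.length : Int) - 2) (-1) (-1))) (i + 1) 0
        = runR nums (i + 1).toNat := by
      rw [show i + 1 = (((i + 1).toNat : Nat) : Int) by omega, PySem.List.pyGetD_natCast]
      exact hR _ (by omega)
    rw [hLi, hRi]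
    have h1 := cond_left nums k i hk hmem.1 (by omega)
    have h2 := cond_right nums k i hk hmem.1 (by omega)
    have hab : ∀ (a b : Bool), (a && b) = decide (a = true ∧ b = true) := by decide
    rw [hab]
    exact decide_eq_decide.mpr (and_congr h1 h2)
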